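-- pv_equiv track=rewrite | github.com/PromiseDodzi/loanword_detection | comparability_score.py | extract_char_pairs_context
-- ===== SOURCE A (Python) =====
-- def extract_char_pairs_context(al1, al2):
--     """
--     Extract char-char pairs with neighbors in aligned words.
--
--     Args:
--         al1: first aligned word
--         al2: second aligned word
--         match=match score
--         mismatch: mismatch score
--
--     Returns:
--         a list of phonemes and their phonological contexts
--     """
--     pairs = []
--     length = len(al1)
--     for i in range(length):
--         c1 = al1[i]
--         c2 = al2[i]
--         left1 = al1[i-1] if i>0 else None
--         right1 = al1[i+1] if i<(length-1) else None
--         left2 = al2[i-1] if i>0 else None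
--         right2 = al2[i+1] if i<(length-1) else None
--         pairs.append(((c1,c2), (left1,left2), (right1,right2)))
--     return pairs
-- ===== SOURCE B (Python) =====
-- def extract_char_pairs_context(al1, al2):
--     """Build the answer by zipping six padded/shifted sequences instead of indexing."""
--     n = len(al1)
--     lefts1 = [None] + al1[: max(n - 1, 0)]
--     lefts2 = [None] + al2[: max(n - 1, 0)]
--     rights1 = al1[1:n] + [None]
--     rights2 = al2[1:n] + [None]
--     return [((c1, c2), (l1, l2), (r1, r2))
--             for (c1, c2), (l1, l2), (r1, r2)
--             in zip(zip(al1, al2), zip(lefts1, lefts2), zip(rights1, rights2))]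
-- ===== Notes on version B (the rewrite author's own statement) =====
-- stated objective: alternative
-- what changed: Replaces the index loop with guarded al[i-1]/al[i+1] lookups by building six padded/shifted slice sequences and zipping them into the result in one combining pass.
-- outside the precondition, e.g. on extract_char_pairs_context(['a', 'b'], ['x']): A raises IndexError, B returns [(('a', 'x'), (None, None), ('b', None))]
import Mathlib
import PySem

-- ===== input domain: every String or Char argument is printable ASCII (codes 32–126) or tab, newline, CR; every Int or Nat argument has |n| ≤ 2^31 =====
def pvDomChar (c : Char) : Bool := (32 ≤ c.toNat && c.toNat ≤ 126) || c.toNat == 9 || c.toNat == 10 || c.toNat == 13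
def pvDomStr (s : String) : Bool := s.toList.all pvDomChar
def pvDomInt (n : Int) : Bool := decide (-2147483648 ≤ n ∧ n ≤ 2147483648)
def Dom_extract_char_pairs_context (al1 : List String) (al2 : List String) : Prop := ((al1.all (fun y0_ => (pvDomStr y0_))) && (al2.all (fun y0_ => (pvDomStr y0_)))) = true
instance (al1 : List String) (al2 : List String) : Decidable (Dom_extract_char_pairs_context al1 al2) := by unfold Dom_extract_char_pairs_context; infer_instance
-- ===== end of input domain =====

-- B builds six padded/shifted slice sequences and zips them, instead of A's index loop with guarded lookups (objective: alternative decomposition).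

-- ===== PORT A =====
def extract_char_pairs_context (al1 : List String) (al2 : List String) : List ((String × String) × (Option String × Option String) × (Option String × Option String)) :=
  let length : Int := al1.length
  (PySem.List.pyRange 0 length 1).foldl (fun pairs i =>
    let c1 := PySem.List.pyGetD al1 i ""
    let c2 := PySem.List.pyGetD al2 i ""
    let left1 : Option String := if i > 0 then some (PySem.List.pyGetD al1 (i-1) "") else none
    let right1 : Option String := if i < length - 1 then some (PySem.List.pyGetD al1 (i+1) "") else none
    let left2 : Option String := if i > 0 then some (PySem.List.pyGetD al2 (i-1) "") else none
    let right2 : Option String := if i < length - 1 then some (PySem.List.pyGetD al2 (i+1) "") else none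
    pairs ++ [((c1, c2), (left1, left2), (right1, right2))]) []

-- ===== PORT B =====
def extract_char_pairs_context_alt (al1 : List String) (al2 : List String) : List ((String × String) × (Option String × Option String) × (Option String × Option String)) :=
  let n : Int := al1.length
  let lefts1 : List (Option String) := none :: (PySem.List.slice al1 none (some (max (n - 1) 0))).map some
  let lefts2 : List (Option String) := none :: (PySem.List.slice al2 none (some (max (n - 1) 0))).map some
  let rights1 : List (Option String) := (PySem.List.slice al1 (some 1) (some n)).map some ++ [none]
  let rights2 : List (Option String) := (PySem.List.slice al2 (some 1) (some n)).map some ++ [none]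
  ((al1.zip al2).zip ((lefts1.zip lefts2).zip (rights1.zip rights2))).map
    (fun p => ((p.1.1, p.1.2), (p.2.1.1, p.2.1.2), (p.2.2.1, p.2.2.2)))

-- ===== PRECONDITION & SPEC =====
-- Pre_ excludes exactly the inputs with len(al2) < len(al1), on which Python A raises IndexError (al2[i]).
def Pre_extract_char_pairs_context (al1 : List String) (al2 : List String) : Prop := al1.length ≤ al2.length
instance (al1 : List String) (al2 : List String) : Decidable (Pre_extract_char_pairs_context al1 al2) := by unfold Pre_extract_char_pairs_context; infer_instance
def pvWitness_extract_char_pairs_context : List String × List String := (["a", "b", "c"], ["x", "-", "z"])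

def Spec_extract_char_pairs_context (al1 : List String) (al2 : List String) (out : List ((String × String) × (Option String × Option String) × (Option String × Option String))) : Prop := out = extract_char_pairs_context_alt al1 al2
instance (al1 : List String) (al2 : List String) (out : List ((String × String) × (Option String × Option String) × (Option String × Option String))) : Decidable (Spec_extract_char_pairs_context al1 al2 out) := by unfold Spec_extract_char_pairs_context; infer_instance

-- ===== CLAIM (what is proved, stated in full; the proofs are below) =====
def Claim_equal_extract_char_pairs_context : Prop := ∀ (al1 : List String) (al2 : List String), Dom_extract_char_pairs_context al1 al2 → Pre_extract_char_pairs_context al1 al2 → Spec_extract_char_pairs_context al1 al2 (extract_char_pairs_context al1 al2)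

-- ===== LEMMAS AND PROOFS =====

-- the common index-wise description both programs are reduced to
def pvRow (al1 al2 : List String) (k : Nat) : (String × String) × (Option String × Option String) × (Option String × Option String) :=
  ((al1.getD k "", al2.getD k ""),
   (if k = 0 then none else some (al1.getD (k-1) ""), if k = 0 then none else some (al2.getD (k-1) "")),
   (if k+1 < al1.length then some (al1.getD (k+1) "") else none, if k+1 < al1.length then some (al2.getD (k+1) "") else none))

lemma A_eq_map (al1 al2 : List String) :
    extract_char_pairs_context al1 al2 = (List.range al1.length).map (pvRow al1 al2) := by
  unfold extract_char_pairs_context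
  simp only [PySem.List.pyRange_zero_nat, List.foldl_map, PySem.List.foldl_append_singleton_eq_map, List.nil_append]
  refine List.map_congr_left ?_
  intro k hk
  rw [List.mem_range] at hk
  have h1 : ((k:Int) < (al1.length:Int) - 1) ↔ k + 1 < al1.length := by omega
  have h3 : ((k:Int)) + 1 = ((k+1 : Nat) : Int) := by push_cast; ring
  simp only [pvRow, h3, PySem.List.pyGetD_natCast]
  rcases Nat.eq_zero_or_pos k with h | h
  · subst h; simp
  · obtain ⟨j, rfl⟩ : ∃ j, k = j + 1 := ⟨k - 1, by omega⟩
    have h4 : ((j+1 : Nat):Int) - 1 = (j : Int) := by push_cast; ring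
    simp only [h4, PySem.List.pyGetD_natCast, h1]
    simp [show ((j:Int)+1 > 0) from by omega]

lemma left_elem (al : List String) (n k : Nat) (hk : k < n) (hlen : n ≤ al.length)
    (hh : k < (none :: (al.take (n - 1)).map (some (α := String))).length) :
    (none :: (al.take (n - 1)).map (some (α := String)))[k]'hh = if k = 0 then none else some (al.getD (k-1) "") := by
  rcases k with _ | j
  · simp
  · simp [List.getElem_take, List.getD_eq_getElem?_getD,
      List.getElem?_eq_getElem (show j < al.length by omega)]

lemma right_elem (al : List String) (n k : Nat) (hk : k < n) (hlen : n ≤ al.length)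
    (hh : k < (((al.drop 1).take (n - 1)).map (some (α := String)) ++ [none]).length) :
    (((al.drop 1).take (n - 1)).map (some (α := String)) ++ [none])[k]'hh = if k + 1 < n then some (al.getD (k+1) "") else none := by
  by_cases hlt : k + 1 < n
  · rw [List.getElem_append_left (by simp; omega)]
    rw [List.getElem_map, List.getElem_take, List.getElem_drop,
      List.getD_eq_getElem?_getD, List.getElem?_eq_getElem (show k + 1 < al.length by omega)]
    simp [hlt, Nat.add_comm]
  · rw [List.getElem_append_right (by simp; omega)]
    simp [hlt]

lemma B_eq_map (al1 al2 : List String) (h : al1.length ≤ al2.length) :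
    extract_char_pairs_context_alt al1 al2 = (List.range al1.length).map (pvRow al1 al2) := by
  unfold extract_char_pairs_context_alt
  have hc : max ((al1.length:Int) - 1) 0 = ((al1.length - 1 : Nat) : Int) := by omega
  have hs1 : PySem.List.slice al1 (some 1) (some (al1.length:Int)) = (al1.drop 1).take (al1.length - 1) := by
    simpa using PySem.List.slice_natCast al1 1 al1.length
  have hs2 : PySem.List.slice al2 (some 1) (some (al1.length:Int)) = (al2.drop 1).take (al1.length - 1) := by
    simpa using PySem.List.slice_natCast al2 1 al1.length
  simp only [hc, PySem.List.slice_to_natCast, hs1, hs2]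
  apply List.ext_getElem
  · simp; omega
  · intro k hk1 hk2
    have hkn : k < al1.length := by simpa using hk2
    simp only [List.getElem_map, List.getElem_zip]
    rw [left_elem al1 al1.length k hkn le_rfl, left_elem al2 al1.length k hkn h,
        right_elem al1 al1.length k hkn le_rfl, right_elem al2 al1.length k hkn h]
    simp [pvRow, List.getD_eq_getElem?_getD, List.getElem?_eq_getElem hkn,
      List.getElem?_eq_getElem (show k < al2.length by omega)]

-- ===== VERDICT (by name: the statement is the Claim_ definition above) =====
theorem extract_char_pairs_context_spec : Claim_equal_extract_char_pairs_context := by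
  intro al1 al2 _ hpre
  unfold Spec_extract_char_pairs_context
  rw [A_eq_map, B_eq_map al1 al2 hpre]
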